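-- pv_equiv track=rewrite | github.com/Shubhamlmp/Programming-Practice | Python/matrixElementsSum.py | solution
-- ===== SOURCE A (Python) =====
-- def solution(matrix):
--
--     ls = []
--     for i, elem in enumerate(matrix):
--         for j in range(len(elem)):
--             if matrix[i][j] != 0:
--                 if i==0:
--                     ls.append(matrix[i][j])
--                 elif i>=1:
--
--                     if matrix[i-1][j] == 0:
--                         matrix[i][j] = 0
--                     elif matrix[i-1][j] != 0:
--
--                         ls.append(matrix[i][j])
--
--     return sum(ls)
-- ===== SOURCE B (Python) =====
-- def solution(matrix):
--     total = 0
--     blocked = set()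
--     for row in matrix:
--         for j, v in enumerate(row):
--             if v == 0:
--                 blocked.add(j)
--             elif j not in blocked:
--                 total += v
--     return total
-- ===== Notes on version B (the rewrite author's own statement) =====
-- stated objective: simpler
-- what changed: Replaces A's in-place matrix mutation plus previous-row lookups and an appended list that is summed at the end by a single non-mutating pass that keeps a running total and a set of blocked column indices (a column blocks once a zero is seen in it).
import Mathlib
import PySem

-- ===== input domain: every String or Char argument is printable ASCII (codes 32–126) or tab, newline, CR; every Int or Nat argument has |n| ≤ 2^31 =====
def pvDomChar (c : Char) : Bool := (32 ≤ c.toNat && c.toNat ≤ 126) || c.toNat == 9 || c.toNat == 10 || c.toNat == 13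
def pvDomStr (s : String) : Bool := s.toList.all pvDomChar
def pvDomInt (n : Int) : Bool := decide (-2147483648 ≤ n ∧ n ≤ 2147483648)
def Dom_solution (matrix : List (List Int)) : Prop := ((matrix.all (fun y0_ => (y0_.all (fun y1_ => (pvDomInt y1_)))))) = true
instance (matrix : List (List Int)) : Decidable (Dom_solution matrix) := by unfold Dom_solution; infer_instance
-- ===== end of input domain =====

-- One honest line: A mutates `matrix` in place and sums an appended list; B is a non-mutating
-- single pass with a running total and a set of blocked column indices (objective: simpler).
-- The equivalence proved is about the RETURN value only (B does not perform A's mutation).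

-- ===== PORT A =====
def solution (matrix : List (List Int)) : Int :=
  -- literal transliteration: outer loop 'for i, elem in enumerate(matrix)', inner
  -- 'for j in range(len(elem))'; state = (mutated matrix, ls).  matrix[i-1][j] is read
  -- with getD 0: the `none` case (Python IndexError) is excluded by Pre_solution.
  let final :=
    (List.range matrix.length).foldl
      (fun st i =>
        (List.range ((st.1.getD i []).length)).foldl
          (fun st2 j =>
            let m := st2.1
            let row := m.getD i []
            let v := row.getD j 0
            if v ≠ 0 then
              if i = 0 then (m, st2.2 ++ [v])
              else if (m.getD (i - 1) []).getD j 0 = 0 then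
                (m.set i (row.set j 0), st2.2)
              else (m, st2.2 ++ [v])
            else st2)
          st)
      (matrix, ([] : List Int))
  final.2.sum

-- ===== PORT B =====
def solution_alt (matrix : List (List Int)) : Int :=
  (matrix.foldl
    (fun st row =>
      (PySem.List.enumerate row).foldl
        (fun st2 p =>
          if p.2 = 0 then (st2.1, PySem.Set.add st2.2 p.1)
          else if ¬ (PySem.Set.contains st2.2 p.1 = true) then (st2.1 + p.2, st2.2)
          else st2)
        st)
    ((0 : Int), (PySem.Set.empty : PySem.Set Int))).1

-- ===== PRECONDITION & SPEC =====
-- Pre_ excludes exactly the inputs on which A raises IndexError: a row with a nonzero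
-- cell at a column index not present in the previous row.
def Pre_solution (matrix : List (List Int)) : Prop :=
  ∀ i < matrix.length, ∀ j < (matrix.getD i []).length,
    1 ≤ i → (matrix.getD i []).getD j 0 ≠ 0 → j < (matrix.getD (i - 1) []).length
instance (matrix : List (List Int)) : Decidable (Pre_solution matrix) := by
  unfold Pre_solution; infer_instance

def pvWitness_solution : List (List Int) := [[1, 2], [0, 3], [4, 5]]

def Spec_solution (matrix : List (List Int)) (out : Int) : Prop := out = solution_alt matrix
instance (matrix : List (List Int)) (out : Int) : Decidable (Spec_solution matrix out) := by
  unfold Spec_solution; infer_instance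

-- ===== CLAIM (what is proved, stated in full; the proofs are below) =====
def Claim_equal_solution : Prop :=
  ∀ (matrix : List (List Int)), Dom_solution matrix → Pre_solution matrix →
    Spec_solution matrix (solution matrix)
-- ===== LEMMAS AND PROOFS =====

-- Abbreviations over the fixed input matrix (proof-side only).
def pvL (matrix : List (List Int)) (r : Nat) : Nat := (matrix.getD r []).length
def pvV (matrix : List (List Int)) (r j : Nat) : Int := (matrix.getD r []).getD j 0
-- `cell (r,j) is alive`: nonzero and every existing cell above it in column j is nonzero.
def pvFb (matrix : List (List Int)) (r j : Nat) : Bool :=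
  decide (pvV matrix r j ≠ 0 ∧ ∀ r' < r, j < pvL matrix r' → pvV matrix r' j ≠ 0)
def pvGainP (matrix : List (List Int)) (i t : Nat) : Int :=
  ((List.range t).map (fun j => if pvFb matrix i j then pvV matrix i j else 0)).sum
def pvGain (matrix : List (List Int)) (r : Nat) : Int := pvGainP matrix r (pvL matrix r)
def pvTot (matrix : List (List Int)) (k : Nat) : Int :=
  ((List.range k).map (pvGain matrix)).sum

-- ---------- A side ----------
def pvStepA (i : Nat) (st2 : List (List Int) × List Int) (j : Nat) : List (List Int) × List Int :=
  let m := st2.1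
  let row := m.getD i []
  let v := row.getD j 0
  if v ≠ 0 then
    if i = 0 then (m, st2.2 ++ [v])
    else if (m.getD (i - 1) []).getD j 0 = 0 then
      (m.set i (row.set j 0), st2.2)
    else (m, st2.2 ++ [v])
  else st2

theorem pv_solution_eq (matrix : List (List Int)) :
    solution matrix =
      ((List.range matrix.length).foldl
        (fun st i => (List.range ((st.1.getD i []).length)).foldl (pvStepA i) st)
        (matrix, ([] : List Int))).2.sum := rfl

-- invariant on the mutated matrix after rows < i are done and cells j < t of row i are done
def pvInvRow (matrix : List (List Int)) (i t : Nat) (M : List (List Int)) : Prop :=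
  M.length = matrix.length ∧
  (∀ r, (M.getD r []).length = pvL matrix r) ∧
  (∀ r j, (M.getD r []).getD j 0 =
    if (r < i ∧ pvFb matrix r j = false) ∨ (r = i ∧ j < t ∧ pvFb matrix r j = false)
    then 0 else pvV matrix r j)

theorem pvV_zero_of_ge (matrix : List (List Int)) (r j : Nat) (h : pvL matrix r ≤ j) :
    pvV matrix r j = 0 := by
  unfold pvV; unfold pvL at h
  exact List.getD_eq_default _ _ h

theorem pv_getD_set_eq {α : Type} (l : List α) (i : Nat) (x d : α) (h : i < l.length) :
    (l.set i x).getD i d = x := by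
  simp [List.getD_eq_getElem?_getD, List.getElem?_set, h]

theorem pv_getD_set_ne {α : Type} (l : List α) (i j : Nat) (x d : α) (h : i ≠ j) :
    (l.set i x).getD j d = l.getD j d := by
  simp [List.getD_eq_getElem?_getD, List.getElem?_set, h]

theorem pvStepA_spec (matrix : List (List Int)) (hpre : Pre_solution matrix)
    (i : Nat) (hi : i < matrix.length) (t : Nat) (ht : t < pvL matrix i)
    (M : List (List Int)) (ls : List Int) (h : pvInvRow matrix i t M) :
    pvInvRow matrix i (t + 1) (pvStepA i (M, ls) t).1 ∧
    (pvStepA i (M, ls) t).2.sum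
      = ls.sum + (if pvFb matrix i t then pvV matrix i t else 0) := by
  obtain ⟨h1, h2, h3⟩ := h
  have hrowt : (M.getD i []).getD t 0 = pvV matrix i t := by
    rw [h3 i t]; simp
  by_cases hv : pvV matrix i t = 0
  · -- zero cell: nothing happens
    have hF : pvFb matrix i t = false := by simp [pvFb, hv]
    have hstep : pvStepA i (M, ls) t = (M, ls) := by
      simp only [pvStepA]
      rw [hrowt, if_neg (fun h => h hv)]
    rw [hstep]
    refine ⟨⟨h1, h2, ?_⟩, by simp [hF]⟩
    intro r j
    rw [h3 r j]
    by_cases hr : r = i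
    · subst hr
      by_cases hjt : j = t
      · subst hjt; simp [hF, hv]
      · have : (j < t + 1 ↔ j < t) := by omega
        simp [this]
    · simp [hr]
  · -- nonzero cell
    by_cases hi0 : i = 0
    · subst hi0
      have hF : pvFb matrix 0 t = true := by simp [pvFb, hv]
      have hstep : pvStepA 0 (M, ls) t = (M, ls ++ [pvV matrix 0 t]) := by
        simp only [pvStepA]
        rw [hrowt, if_pos hv]
        simp
      rw [hstep]
      refine ⟨⟨h1, h2, ?_⟩, by simp [hF]⟩
      intro r j
      rw [h3 r j]
      by_cases hr : r = 0
      · subst hr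
        by_cases hjt : j = t
        · subst hjt; simp [hF]
        · have : (j < t + 1 ↔ j < t) := by omega
          simp [this]
      · simp [hr]
    · -- i ≥ 1: look at the (mutated) cell above
      have hv' : (matrix.getD i []).getD t 0 ≠ 0 := hv
      have hPre : t < (matrix.getD (i - 1) []).length := hpre i hi t ht (by omega) hv'
      have habove : (M.getD (i - 1) []).getD t 0 =
          if pvFb matrix (i - 1) t = false then 0 else pvV matrix (i - 1) t := by
        rw [h3 (i - 1) t]
        simp [show i - 1 < i by omega, show ¬ (i - 1 = i) by omega]
      by_cases hFa : pvFb matrix (i - 1) t = true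
      · -- above alive: cell alive, appended
        obtain ⟨ha1, ha2⟩ := of_decide_eq_true hFa
        have habove0 : (M.getD (i - 1) []).getD t 0 ≠ 0 := by
          rw [habove]; simp [hFa]; exact ha1
        have hF : pvFb matrix i t = true := by
          apply decide_eq_true
          refine ⟨hv, ?_⟩
          intro r' hr' hL
          by_cases hr'' : r' = i - 1
          · subst hr''; exact ha1
          · exact ha2 r' (by omega) hL
        have hstep : pvStepA i (M, ls) t = (M, ls ++ [pvV matrix i t]) := by
          simp only [pvStepA]
          rw [hrowt, if_pos hv, if_neg hi0, if_neg habove0]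
        rw [hstep]
        refine ⟨⟨h1, h2, ?_⟩, by simp [hF]⟩
        intro r j
        rw [h3 r j]
        by_cases hr : r = i
        · subst hr
          by_cases hjt : j = t
          · subst hjt; simp [hF]
          · have : (j < t + 1 ↔ j < t) := by omega
            simp [this]
        · simp [hr]
      · -- above dead (mutated to 0): this cell is zeroed, not appended
        have hFa' : pvFb matrix (i - 1) t = false := by
          cases hq : pvFb matrix (i - 1) t
          · rfl
          · exact absurd hq hFa
        have habove0 : (M.getD (i - 1) []).getD t 0 = 0 := by
          rw [habove]; simp [hFa']
        have hdead : ∃ r' < i, t < pvL matrix r' ∧ pvV matrix r' t = 0 := by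
          have := of_decide_eq_false hFa'
          push_neg at this
          by_cases hz : pvV matrix (i - 1) t = 0
          · exact ⟨i - 1, by omega, hPre, hz⟩
          · obtain ⟨r', hr', hL, hz'⟩ := this hz
            exact ⟨r', by omega, hL, hz'⟩
        have hF : pvFb matrix i t = false := by
          apply decide_eq_false
          rintro ⟨-, hall⟩
          obtain ⟨r', hr', hL, hz⟩ := hdead
          exact hall r' hr' hL hz
        have hstep : pvStepA i (M, ls) t =
            (M.set i ((M.getD i []).set t 0), ls) := by
          simp only [pvStepA]
          rw [hrowt, if_pos hv, if_neg hi0, if_pos habove0]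
        rw [hstep]
        have hMlen : i < M.length := by omega
        have hrlen : t < (M.getD i []).length := by rw [h2 i]; exact ht
        refine ⟨⟨by simpa using h1, ?_, ?_⟩, by simp [hF]⟩
        · intro r
          by_cases hr : r = i
          · subst hr
            rw [pv_getD_set_eq _ _ _ _ hMlen, List.length_set, h2 r]
          · rw [pv_getD_set_ne _ _ _ _ _ (fun h => hr h.symm), h2 r]
        · intro r j
          by_cases hr : r = i
          · subst hr
            rw [pv_getD_set_eq _ _ _ _ hMlen]
            by_cases hjt : j = t
            · subst hjt
              rw [pv_getD_set_eq _ _ _ _ hrlen]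
              simp [hF, show j < j + 1 by omega]
            · rw [pv_getD_set_ne _ _ _ _ _ (fun h => hjt h.symm), h3 r j]
              have hiff : (j < t + 1 ↔ j < t) := by omega
              simp [hiff]
          · rw [pv_getD_set_ne _ _ _ _ _ (fun h => hr h.symm), h3 r j]
            simp [hr]

theorem pvInnerA (matrix : List (List Int)) (hpre : Pre_solution matrix)
    (i : Nat) (hi : i < matrix.length) :
    ∀ t, t ≤ pvL matrix i → ∀ (M : List (List Int)) (ls : List Int),
      pvInvRow matrix i 0 M →
      pvInvRow matrix i t ((List.range t).foldl (pvStepA i) (M, ls)).1 ∧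
      ((List.range t).foldl (pvStepA i) (M, ls)).2.sum = ls.sum + pvGainP matrix i t := by
  intro t
  induction t with
  | zero => intro _ M ls h; simpa [pvGainP] using h
  | succ t ih =>
    intro hle M ls h0
    have ht : t < pvL matrix i := by omega
    obtain ⟨h1, h2⟩ := ih (by omega) M ls h0
    rw [List.range_succ, List.foldl_append]
    obtain ⟨e1, e2⟩ := pvStepA_spec matrix hpre i hi t ht
      ((List.range t).foldl (pvStepA i) (M, ls)).1
      ((List.range t).foldl (pvStepA i) (M, ls)).2 h1
    constructor
    · simpa using e1
    · simp only [List.foldl_cons, List.foldl_nil]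
      calc (pvStepA i ((List.range t).foldl (pvStepA i) (M, ls)) t).2.sum
          = ((List.range t).foldl (pvStepA i) (M, ls)).2.sum
            + (if pvFb matrix i t then pvV matrix i t else 0) := by
            simpa using e2
        _ = ls.sum + pvGainP matrix i (t + 1) := by
            rw [h2]; unfold pvGainP; rw [List.range_succ]; simp [add_assoc]

-- pvInvRow i (L i) M → pvInvRow (i+1) 0 M
theorem pvInvRow_next (matrix : List (List Int)) (i : Nat) (M : List (List Int))
    (h : pvInvRow matrix i (pvL matrix i) M) : pvInvRow matrix (i + 1) 0 M := by
  obtain ⟨h1, h2, h3⟩ := h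
  refine ⟨h1, h2, ?_⟩
  intro r j
  rw [h3 r j]
  by_cases hF : pvFb matrix r j = false
  · by_cases hr : r < i
    · simp [hr, hF, show r < i + 1 by omega]
    · by_cases hri : r = i
      · subst hri
        by_cases hj : j < pvL matrix r
        · simp [hr, hF, hj, show r < r + 1 by omega]
        · have hz : pvV matrix r j = 0 := pvV_zero_of_ge matrix r j (by omega)
          simp [hr, hF, hj, hz, show r < r + 1 by omega]
      · simp [hr, hri, show ¬ r < i + 1 by omega]
  · simp [hF]

theorem pvOuterA (matrix : List (List Int)) (hpre : Pre_solution matrix) :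
    ∀ k, k ≤ matrix.length →
      pvInvRow matrix k 0
        ((List.range k).foldl
          (fun st i => (List.range ((st.1.getD i []).length)).foldl (pvStepA i) st)
          (matrix, ([] : List Int))).1 ∧
      ((List.range k).foldl
          (fun st i => (List.range ((st.1.getD i []).length)).foldl (pvStepA i) st)
          (matrix, ([] : List Int))).2.sum = pvTot matrix k := by
  intro k
  induction k with
  | zero =>
    intro _
    refine ⟨⟨rfl, fun r => rfl, ?_⟩, by simp [pvTot]⟩
    intro r j; simp [pvV]
  | succ k ih =>
    intro hk
    obtain ⟨h1, h2⟩ := ih (by omega)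
    rw [List.range_succ, List.foldl_append]
    set st := (List.range k).foldl
      (fun st i => (List.range ((st.1.getD i []).length)).foldl (pvStepA i) st)
      (matrix, ([] : List Int)) with hst
    simp only [List.foldl_cons, List.foldl_nil]
    have hlen : (st.1.getD k []).length = pvL matrix k := h1.2.1 k
    rw [hlen]
    obtain ⟨g1, g2⟩ := pvInnerA matrix hpre k (by omega) (pvL matrix k) (le_refl _)
      st.1 st.2 (by simpa using h1)
    constructor
    · exact pvInvRow_next matrix k _ (by simpa using g1)
    · calc ((List.range (pvL matrix k)).foldl (pvStepA k) st).2.sum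
          = st.2.sum + pvGainP matrix k (pvL matrix k) := by simpa using g2
        _ = pvTot matrix (k + 1) := by
            rw [h2]; unfold pvTot; rw [List.range_succ]; simp [pvGain]

theorem pvA_total (matrix : List (List Int)) (hpre : Pre_solution matrix) :
    solution matrix = pvTot matrix matrix.length := by
  rw [pv_solution_eq]
  exact (pvOuterA matrix hpre matrix.length (le_refl _)).2

-- ---------- B side ----------
def pvStepB (st2 : Int × PySem.Set Int) (p : Int × Int) : Int × PySem.Set Int :=
  if p.2 = 0 then (st2.1, PySem.Set.add st2.2 p.1)
  else if ¬ (PySem.Set.contains st2.2 p.1 = true) then (st2.1 + p.2, st2.2)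
  else st2

theorem pv_solution_alt_eq (matrix : List (List Int)) :
    solution_alt matrix =
      (matrix.foldl (fun st row => (PySem.List.enumerate row).foldl pvStepB st)
        ((0 : Int), (PySem.Set.empty : PySem.Set Int))).1 := rfl

def pvRowSum : List Int → Int → (Int → Bool) → Int
  | [], _, _ => 0
  | v :: vs, s, P => (if v = 0 then 0 else if P s then 0 else v) + pvRowSum vs (s + 1) P

def pvRowZ : List Int → Int → Int → Bool
  | [], _, _ => false
  | v :: vs, s, x => (decide (v = 0) && decide (x = s)) || pvRowZ vs (s + 1) x

theorem pvRowSum_congr (vs : List Int) : ∀ (s : Int) (P Q : Int → Bool),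
    (∀ x, s ≤ x → P x = Q x) → pvRowSum vs s P = pvRowSum vs s Q := by
  induction vs with
  | nil => intro s P Q h; rfl
  | cons v vs ih =>
    intro s P Q h
    simp only [pvRowSum]
    rw [h s (le_refl s), ih (s + 1) P Q (fun x hx => h x (by omega))]

theorem pv_contains_add (b : PySem.Set Int) (y x : Int) :
    PySem.Set.contains (PySem.Set.add b y) x = (PySem.Set.contains b x || decide (x = y)) := by
  rw [Bool.eq_iff_iff]
  simp [PySem.Set.contains_iff, PySem.Set.mem_add]

theorem pvB1 (row : List Int) : ∀ (s t : Int) (b : PySem.Set Int) (P : Int → Bool),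
    (∀ x, PySem.Set.contains b x = P x) →
    ((PySem.List.enumerate row s).foldl pvStepB (t, b)).1 = t + pvRowSum row s P ∧
    (∀ x, PySem.Set.contains ((PySem.List.enumerate row s).foldl pvStepB (t, b)).2 x
      = (P x || pvRowZ row s x)) := by
  induction row with
  | nil =>
    intro s t b P hb
    refine ⟨by simp [PySem.List.enumerate_nil, pvRowSum], ?_⟩
    intro x
    simp only [PySem.List.enumerate_nil, List.foldl_nil, pvRowZ, Bool.or_false]
    exact hb x
  | cons v vs ih =>
    intro s t b P hb
    rw [PySem.List.enumerate_cons]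
    simp only [List.foldl_cons]
    by_cases hv : v = 0
    · have hstep : pvStepB (t, b) (s, v) = (t, PySem.Set.add b s) := by
        simp only [pvStepB]
        rw [if_pos hv]
      rw [hstep]
      have hb' : ∀ x, PySem.Set.contains (PySem.Set.add b s) x = (P x || decide (x = s)) := by
        intro x; rw [pv_contains_add, hb]
      obtain ⟨g1, g2⟩ := ih (s + 1) t (PySem.Set.add b s) (fun x => P x || decide (x = s)) hb'
      constructor
      · rw [g1, pvRowSum_congr vs (s + 1) (fun x => P x || decide (x = s)) P
          (fun x hx => by simp [show ¬ x = s by omega])]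
        simp only [pvRowSum]
        rw [if_pos hv]
        ring
      · intro x; rw [g2 x]
        simp only [pvRowZ]
        simp [hv, Bool.or_assoc]
    · have hcont : PySem.Set.contains b s = P s := hb s
      by_cases hPs : P s = true
      · have hstep : pvStepB (t, b) (s, v) = (t, b) := by
          simp only [pvStepB]
          rw [if_neg hv, hcont, if_neg (not_not_intro hPs)]
        rw [hstep]
        obtain ⟨g1, g2⟩ := ih (s + 1) t b P hb
        constructor
        · rw [g1]; simp only [pvRowSum]; rw [if_neg hv, if_pos hPs]; ring
        · intro x; rw [g2 x]; simp only [pvRowZ]; simp [hv]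
      · have hstep : pvStepB (t, b) (s, v) = (t + v, b) := by
          simp only [pvStepB]
          rw [if_neg hv, hcont, if_pos hPs]
        rw [hstep]
        obtain ⟨g1, g2⟩ := ih (s + 1) (t + v) b P hb
        constructor
        · rw [g1]; simp only [pvRowSum]
          rw [if_neg hv, if_neg (by simpa using hPs)]; ring
        · intro x; rw [g2 x]; simp only [pvRowZ]; simp [hv]

def pvBlk (matrix : List (List Int)) (k : Nat) (x : Int) : Bool :=
  decide (∃ r < k, ∃ j < pvL matrix r, pvV matrix r j = 0 ∧ x = (j : Int))

theorem pvRowZ_iff (vs : List Int) : ∀ (s x : Int),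
    pvRowZ vs s x = true ↔ ∃ j < vs.length, vs.getD j 0 = 0 ∧ x = s + (j : Int) := by
  induction vs with
  | nil => intro s x; simp [pvRowZ]
  | cons v vs ih =>
    intro s x
    simp only [pvRowZ, Bool.or_eq_true, Bool.and_eq_true, decide_eq_true_eq, ih (s + 1) x]
    constructor
    · rintro (⟨hv, hx⟩ | ⟨j, hj, hz, hx⟩)
      · exact ⟨0, by simp, by simpa using hv, by simpa using hx⟩
      · exact ⟨j + 1, by simpa using hj, by simpa using hz, by push_cast; omega⟩
    · rintro ⟨j, hj, hz, hx⟩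
      cases j with
      | zero => left; exact ⟨by simpa using hz, by simpa using hx⟩
      | succ j =>
        right
        exact ⟨j, by simpa using hj, by simpa using hz, by push_cast at hx ⊢; omega⟩

theorem pvBlk_succ (matrix : List (List Int)) (k : Nat) (x : Int) :
    (pvBlk matrix k x || pvRowZ (matrix.getD k []) 0 x) = pvBlk matrix (k + 1) x := by
  rw [Bool.eq_iff_iff]
  simp only [Bool.or_eq_true, pvBlk, decide_eq_true_eq, pvRowZ_iff]
  constructor
  · rintro (⟨r, hr, j, hj, hz, hx⟩ | ⟨j, hj, hz, hx⟩)
    · exact ⟨r, by omega, j, hj, hz, hx⟩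
    · exact ⟨k, by omega, j, hj, hz, by simpa using hx⟩
  · rintro ⟨r, hr, j, hj, hz, hx⟩
    by_cases hrk : r < k
    · left; exact ⟨r, hrk, j, hj, hz, hx⟩
    · right; have : r = k := by omega
      subst this
      exact ⟨j, hj, hz, by simpa using hx⟩

theorem pvRowSum_closed (vs : List Int) : ∀ (s : Nat) (P : Int → Bool),
    pvRowSum vs ((s : Nat) : Int) P
      = ((List.range vs.length).map (fun j =>
          if vs.getD j 0 ≠ 0 ∧ P (((s + j : Nat) : Int)) = false then vs.getD j 0 else 0)).sum := by
  induction vs with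
  | nil => intro s P; simp [pvRowSum]
  | cons v vs ih =>
    intro s P
    simp only [pvRowSum]
    rw [show ((s : Nat) : Int) + 1 = (((s + 1 : Nat)) : Int) by push_cast; ring]
    rw [ih (s + 1) P]
    rw [List.length_cons, List.range_succ_eq_map]
    simp only [List.map_cons, List.map_map, List.sum_cons]
    congr 1
    · simp only [List.getD_cons_zero, Nat.add_zero]
      by_cases hv : v = 0
      · simp [hv]
      · by_cases hP : P ((s : Nat) : Int) = false
        · simp [hv, hP]
        · have hP' : P ((s : Nat) : Int) = true := by
            cases hq : P ((s : Nat) : Int)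
            · exact absurd hq hP
            · rfl
          simp [hv, hP']
    · apply congrArg List.sum
      apply List.map_congr_left
      intro j _
      simp only [Function.comp_apply, Nat.succ_eq_add_one, List.getD_cons_succ]
      rw [show s + 1 + j = s + (j + 1) from by omega]

theorem pvBlk_false_iff (matrix : List (List Int)) (k j : Nat) :
    pvBlk matrix k ((j : Nat) : Int) = false ↔
      (∀ r < k, j < pvL matrix r → pvV matrix r j ≠ 0) := by
  simp only [pvBlk, decide_eq_false_iff_not]
  constructor
  · intro h r hr hL hz
    exact h ⟨r, hr, j, hL, hz, rfl⟩
  · rintro h ⟨r, hr, j', hL, hz, hx⟩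
    have : j = j' := by exact_mod_cast hx
    subst this
    exact h r hr hL hz

theorem pvRowSum_gain (matrix : List (List Int)) (k : Nat) :
    pvRowSum (matrix.getD k []) 0 (pvBlk matrix k) = pvGain matrix k := by
  rw [show (0 : Int) = ((0 : Nat) : Int) from rfl, pvRowSum_closed]
  unfold pvGain pvGainP
  apply congrArg List.sum
  apply List.map_congr_left
  intro j hj
  simp only [Nat.zero_add]
  have hV : (matrix.getD k []).getD j 0 = pvV matrix k j := rfl
  rw [hV]
  by_cases hF : pvFb matrix k j = true
  · obtain ⟨hne, hall⟩ := of_decide_eq_true hF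
    rw [if_pos ⟨hne, (pvBlk_false_iff matrix k j).mpr hall⟩, if_pos hF]
  · have hF' : pvFb matrix k j = false := by
      cases hq : pvFb matrix k j
      · rfl
      · exact absurd hq hF
    rw [if_neg, if_neg (by simp [hF'])]
    rintro ⟨hne, hblk⟩
    have hall := (pvBlk_false_iff matrix k j).mp hblk
    exact hF (decide_eq_true ⟨hne, hall⟩)

theorem pvB2 (matrix : List (List Int)) :
    ∀ (suffix : List (List Int)) (k : Nat), matrix.drop k = suffix →
    ∀ (t : Int) (b : PySem.Set Int),
      (∀ x, PySem.Set.contains b x = pvBlk matrix k x) →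
      (suffix.foldl (fun st row => (PySem.List.enumerate row).foldl pvStepB st) (t, b)).1
        = t + ((List.range suffix.length).map (fun r => pvGain matrix (k + r))).sum := by
  intro suffix
  induction suffix with
  | nil => intro k _ t b _; simp
  | cons row rest ih =>
    intro k hdrop t b hb
    have hk : k < matrix.length := by
      by_contra hk
      rw [List.drop_eq_nil_of_le (by omega)] at hdrop
      exact List.cons_ne_nil _ _ hdrop.symm
    have hd : matrix.drop k = matrix[k] :: matrix.drop (k + 1) := List.drop_eq_getElem_cons hk
    rw [hdrop] at hd
    injection hd with e1 e2
    have hrow : matrix.getD k [] = row := by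
      rw [List.getD_eq_getElem matrix [] hk]
      exact e1.symm
    have hrest : matrix.drop (k + 1) = rest := e2.symm
    simp only [List.foldl_cons]
    obtain ⟨g1, g2⟩ := pvB1 row 0 t b (pvBlk matrix k) hb
    have hb' : ∀ x, PySem.Set.contains
        ((PySem.List.enumerate row 0).foldl pvStepB (t, b)).2 x = pvBlk matrix (k + 1) x := by
      intro x
      rw [g2 x, ← pvBlk_succ matrix k x, hrow]
    have := ih (k + 1) hrest
      ((PySem.List.enumerate row 0).foldl pvStepB (t, b)).1
      ((PySem.List.enumerate row 0).foldl pvStepB (t, b)).2 hb'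
    calc (rest.foldl (fun st row => (PySem.List.enumerate row).foldl pvStepB st)
            ((PySem.List.enumerate row).foldl pvStepB (t, b))).1
        = ((PySem.List.enumerate row 0).foldl pvStepB (t, b)).1
          + ((List.range rest.length).map (fun r => pvGain matrix (k + 1 + r))).sum := by
          simpa using this
      _ = t + ((List.range (row :: rest).length).map (fun r => pvGain matrix (k + r))).sum := by
          rw [g1, ← hrow, pvRowSum_gain matrix k]
          rw [List.length_cons, List.range_succ_eq_map]
          simp only [List.map_cons, List.map_map, List.sum_cons]
          have : ((List.range rest.length).map (fun r => pvGain matrix (k + 1 + r)))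
              = ((List.range rest.length).map ((fun r => pvGain matrix (k + r)) ∘ Nat.succ)) := by
            apply List.map_congr_left
            intro a _
            simp [Function.comp]
            congr 1
            omega
          rw [this]
          ring

theorem pvB_total (matrix : List (List Int)) :
    solution_alt matrix = pvTot matrix matrix.length := by
  rw [pv_solution_alt_eq]
  rw [pvB2 matrix matrix 0 (by simp) 0 PySem.Set.empty
    (by intro x; rw [Bool.eq_iff_iff]; simp [PySem.Set.contains_iff, PySem.Set.empty, pvBlk])]
  unfold pvTot
  simp

-- ===== VERDICT (by name: the statement is the Claim_ definition above) =====
theorem solution_spec : Claim_equal_solution := by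
  intro matrix _ hpre
  unfold Spec_solution
  rw [pvA_total matrix hpre, pvB_total matrix]
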